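-- pv_equiv track=rewrite | github.com/jadinm/tpc | test/examples/repetita_network.py | label2node
-- ===== SOURCE A (Python) =====
-- import string
--
-- def label2node(label):
--     node_name = ""
--     for i in range(len(label)):
--         if len(node_name) == 9:
--             break
--         if label[i] in string.ascii_letters or label[i] in "-_" or label[i] in string.digits:
--             node_name = node_name + label[i]
--     return node_name
-- ===== SOURCE B (Python) =====
-- import re
--
-- def label2node(label):
--     return re.sub(r'[^A-Za-z0-9_-]', '', label)[:9]
-- ===== Notes on version B (the rewrite author's own statement) =====
-- stated objective: idiomatic
-- what changed: Replaces the explicit accumulate-and-break character loop with a single regex substitution dropping invalid characters followed by a [:9] slice.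
import Mathlib
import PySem

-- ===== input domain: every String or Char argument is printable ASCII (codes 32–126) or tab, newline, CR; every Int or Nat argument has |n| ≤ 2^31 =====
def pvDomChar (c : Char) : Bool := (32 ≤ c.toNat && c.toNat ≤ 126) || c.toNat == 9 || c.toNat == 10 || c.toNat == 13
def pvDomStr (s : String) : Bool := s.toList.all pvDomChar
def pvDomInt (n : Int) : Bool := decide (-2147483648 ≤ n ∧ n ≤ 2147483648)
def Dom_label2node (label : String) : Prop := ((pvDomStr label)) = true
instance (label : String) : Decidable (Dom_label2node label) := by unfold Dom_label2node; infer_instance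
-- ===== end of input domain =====

-- B replaces A's accumulate-and-break loop by one regex substitution plus a [:9] slice (idiomatic).

-- ===== PORT A =====
-- label[i] in string.ascii_letters / "-_" / string.digits, as literal membership tests
def pvAValid (c : Char) : Bool :=
  "abcdefghijklmnopqrstuvwxyzABCDEFGHIJKLMNOPQRSTUVWXYZ".toList.contains c
  || "-_".toList.contains c
  || "0123456789".toList.contains c

-- the for-loop over range(len(label)) with the len==9 break, on the char list
def pvALoop : List Char → List Char → List Char
  | [], acc => acc
  | c :: cs, acc =>
    if acc.length = 9 then acc
    else if pvAValid c then pvALoop cs (acc ++ [c])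
    else pvALoop cs acc

def label2node (label : String) : String := String.mk (pvALoop label.toList [])

-- ===== PORT B =====
-- re.sub(r'[^A-Za-z0-9_-]', '', label): the character class ported by hand as its range test (exact on ASCII)
def pvBClass (c : Char) : Bool :=
  ('A' ≤ c && c ≤ 'Z') || ('a' ≤ c && c ≤ 'z') || ('0' ≤ c && c ≤ '9') || c == '_' || c == '-'

def label2node_alt (label : String) : String :=
  String.mk ((label.toList.filter pvBClass).take 9)

-- ===== PRECONDITION & SPEC =====
def Spec_label2node (label : String) (out : String) : Prop := out = label2node_alt label
instance (label : String) (out : String) : Decidable (Spec_label2node label out) := by unfold Spec_label2node; infer_instance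

-- ===== CLAIM (what is proved, stated in full; the proofs are below) =====
def Claim_equal_label2node : Prop := ∀ (label : String), Dom_label2node label → Spec_label2node label (label2node label)

-- ===== LEMMAS AND PROOFS =====

-- the two validity predicates agree on ASCII (decided over the 127 codes)
set_option maxRecDepth 4096 in
theorem pvValid_agree (c : Char) (h : c.toNat ≤ 126) : pvAValid c = pvBClass c := by
  have h127 : c.toNat < 127 := by omega
  have key : ∀ n : Fin 127, pvAValid (Char.ofNat n.val) = pvBClass (Char.ofNat n.val) := by decide
  have hc : Char.ofNat c.toNat = c := Char.ofNat_toNat c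
  have := key ⟨c.toNat, h127⟩
  simpa [hc] using this

theorem pvALoop_eq (l acc : List Char) (h : acc.length ≤ 9)
    (hd : ∀ c ∈ l, c.toNat ≤ 126) :
    pvALoop l acc = acc ++ (l.filter pvBClass).take (9 - acc.length) := by
  induction l generalizing acc with
  | nil => simp [pvALoop]
  | cons c cs ih =>
    have hc := hd c (List.mem_cons_self)
    have hcs : ∀ x ∈ cs, x.toNat ≤ 126 := fun x hx => hd x (List.mem_cons_of_mem _ hx)
    by_cases h9 : acc.length = 9
    · simp [pvALoop, h9]
    · have hlt : acc.length < 9 := lt_of_le_of_ne h h9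
      by_cases hv : pvAValid c = true
      · have hv' : pvBClass c = true := by rw [← pvValid_agree c hc]; exact hv
        have : pvALoop (c :: cs) acc = pvALoop cs (acc ++ [c]) := by
          simp [pvALoop, h9, hv]
        rw [this, ih (acc ++ [c]) (by simp; omega) hcs]
        simp [hv']
        have : 9 - acc.length = (9 - (acc.length + 1)) + 1 := by omega
        rw [this, List.take_succ_cons]
        simp
      · have hv' : pvBClass c = false := by
          rw [← pvValid_agree c hc]; simpa using hv
        have : pvALoop (c :: cs) acc = pvALoop cs acc := by
          simp [pvALoop, h9, hv]
        rw [this, ih acc h hcs]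
        simp [hv']

-- ===== VERDICT (by name: the statement is the Claim_ definition above) =====
theorem label2node_spec : Claim_equal_label2node := by
  intro label hdom
  unfold Spec_label2node label2node label2node_alt
  have hd : ∀ c ∈ label.toList, c.toNat ≤ 126 := by
    intro c hc
    have := List.all_eq_true.mp hdom c hc
    simp [pvDomChar] at this
    omega
  rw [pvALoop_eq label.toList [] (by simp) hd]
  simp
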